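-- pv_equiv track=rewrite | github.com/simka275/Advent-of-Code | 2019/day16.py | fft_past_offset
-- ===== SOURCE A (Python) =====
-- def fft_past_offset(inp, offset):
--     outp = inp.copy()
--     s = 0
--     llim = len(inp)//2 if offset < len(inp)//2 else offset
--     for i in range(len(inp)-1, llim-1, -1):
--         s += inp[i]
--         outp[i] = abs(s) % 10
--     return outp
--
-- inp = [int(x) for x in "03081770884921959731165446850517"*10000]
--
-- offset = int("".join(map(str, inp[:7])))
-- ===== SOURCE B (Python) =====
-- def fft_past_offset(inp, offset):
--     n = len(inp)
--     llim = n//2 if offset < n//2 else offset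
--     head = inp[:llim]
--     tail = inp[llim:]
--     total = sum(tail)
--     new_tail = []
--     for x in tail:
--         new_tail.append(abs(total) % 10)
--         total -= x
--     return head + new_tail
-- ===== Notes on version B (the rewrite author's own statement) =====
-- stated objective: alternative
-- what changed: Instead of A's backward index walk updating a copy in place with a running suffix sum, B slices the list into head and tail, precomputes the tail total once, and builds a fresh tail front-to-back by decrementing the total, concatenating head + new tail.
import Mathlib
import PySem

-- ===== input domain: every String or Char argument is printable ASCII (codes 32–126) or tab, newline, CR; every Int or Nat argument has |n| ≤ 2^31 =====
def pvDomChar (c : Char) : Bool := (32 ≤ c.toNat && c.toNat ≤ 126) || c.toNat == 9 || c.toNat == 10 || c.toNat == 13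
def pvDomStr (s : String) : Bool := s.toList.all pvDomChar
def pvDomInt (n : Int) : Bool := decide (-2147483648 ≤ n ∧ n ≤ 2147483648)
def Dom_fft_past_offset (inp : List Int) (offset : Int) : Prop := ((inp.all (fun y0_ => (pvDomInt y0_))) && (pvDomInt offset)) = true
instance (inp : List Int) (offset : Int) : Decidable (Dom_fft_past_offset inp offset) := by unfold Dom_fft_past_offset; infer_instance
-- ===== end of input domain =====

-- B replaces A's backward in-place index walk (running suffix sum written into a copy) by
-- slicing into head/tail, precomputing the tail total once, and building a fresh tail
-- front-to-back; same O(n) cost, different decomposition. Equivalence is about the RETURN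
-- value; A mutates no argument (it writes into a copy), so there is no side-effect difference.

-- ===== PORT A =====
-- one loop step of A: s += inp[i]; outp[i] = abs(s) % 10
def stepA (inp : List Int) (st : Int × List Int) (i : Int) : Int × List Int :=
  let s := st.1 + PySem.List.pyGetD inp i 0
  (s, PySem.List.pySetD st.2 i (PySem.Int.mod |s| 10))

def fft_past_offset (inp : List Int) (offset : Int) : List Int :=
  let outp := inp
  let llim : Int :=
    if offset < PySem.Int.floordiv (inp.length : Int) 2 then PySem.Int.floordiv (inp.length : Int) 2
    else offset
  ((PySem.List.pyRange ((inp.length : Int) - 1) (llim - 1) (-1)).foldl (stepA inp) (0, outp)).2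

-- ===== PORT B =====
-- B's loop: for x in tail: new_tail.append(abs(total) % 10); total -= x
def bTail : List Int → Int → List Int
  | [], _ => []
  | x :: r, total => PySem.Int.mod |total| 10 :: bTail r (total - x)

def fft_past_offset_alt (inp : List Int) (offset : Int) : List Int :=
  let n : Int := (inp.length : Int)
  let llim : Int :=
    if offset < PySem.Int.floordiv n 2 then PySem.Int.floordiv n 2 else offset
  let head := PySem.List.slice inp none (some llim)
  let tail := PySem.List.slice inp (some llim) none
  head ++ bTail tail tail.sum

-- ===== PRECONDITION & SPEC =====
def Spec_fft_past_offset (inp : List Int) (offset : Int) (out : List Int) : Prop := out = fft_past_offset_alt inp offset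
instance (inp : List Int) (offset : Int) (out : List Int) : Decidable (Spec_fft_past_offset inp offset out) := by unfold Spec_fft_past_offset; infer_instance

-- ===== CLAIM (what is proved, stated in full; the proofs are below) =====
def Claim_equal_fft_past_offset : Prop := ∀ (inp : List Int) (offset : Int), Dom_fft_past_offset inp offset → Spec_fft_past_offset inp offset (fft_past_offset inp offset)

-- ===== LEMMAS AND PROOFS =====

-- the common value of both passes on the active tail: each entry becomes |suffix sum| % 10
def specTail : List Int → List Int
  | [] => []
  | x :: r => PySem.Int.mod |x + r.sum| 10 :: specTail r

lemma bTail_sum : ∀ (xs : List Int), bTail xs xs.sum = specTail xs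
  | [] => rfl
  | x :: r => by
    simp only [bTail, specTail, List.sum_cons, add_sub_cancel_left, bTail_sum r]

lemma set_append_cons {α : Type} (xs : List α) (y v : α) (ys : List α) :
    (xs ++ y :: ys).set xs.length v = xs ++ v :: ys := by
  induction xs with
  | nil => rfl
  | cons a t ih => simp [ih]

lemma Aloop (inp : List Int) : ∀ (k l : Nat), l ≤ inp.length → inp.length - l = k →
    ((PySem.List.pyRange (l : Int) (inp.length : Int) 1).foldr
        (fun i st => stepA inp st i) ((0 : Int), inp))
      = ((inp.drop l).sum, inp.take l ++ specTail (inp.drop l)) := by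
  intro k
  induction k with
  | zero =>
    intro l hle hk
    have hl : l = inp.length := by omega
    subst hl
    rw [PySem.List.pyRange_one_eq_nil (by omega)]
    simp [specTail]
  | succ k ih =>
    intro l hle hk
    have hlt : l < inp.length := by omega
    rw [PySem.List.pyRange_one_cons (by exact_mod_cast hlt)]
    have hcast : (l : Int) + 1 = ((l + 1 : Nat) : Int) := by push_cast; ring
    rw [List.foldr_cons, hcast, ih (l + 1) (by omega) (by omega)]
    have hdrop : inp.drop l = inp[l] :: inp.drop (l + 1) := List.drop_eq_getElem_cons hlt
    have hget : PySem.List.pyGetD inp (l : Int) 0 = inp[l] := by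
      simp [List.getD_eq_getElem?_getD, List.getElem?_eq_getElem hlt]
    have hs : (inp.drop (l + 1)).sum + inp[l] = (inp.drop l).sum := by
      rw [hdrop, List.sum_cons]; ring
    have htake : inp.take (l + 1) = inp.take l ++ [inp[l]] := by
      rw [List.take_add_one, List.getElem?_eq_getElem hlt]; rfl
    simp only [stepA, hget, hs]
    refine Prod.ext rfl ?_
    simp only [htake, List.append_assoc, List.singleton_append]
    have hlen : (inp.take l).length = l := List.length_take_of_le (by omega)
    rw [PySem.List.pySetD_natCast]
    have hset := set_append_cons (inp.take l) (inp[l]) (PySem.Int.mod |(inp.drop l).sum| 10)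
      (specTail (inp.drop (l + 1)))
    rw [hlen] at hset
    rw [hset]
    have hval : PySem.Int.mod |(inp.drop l).sum| 10
        = PySem.Int.mod |inp[l] + (inp.drop (l + 1)).sum| 10 := by
      rw [hdrop, List.sum_cons]
    rw [hval, hdrop]
    simp [specTail]

-- ===== VERDICT (by name: the statement is the Claim_ definition above) =====
theorem fft_past_offset_spec : Claim_equal_fft_past_offset := by
  intro inp offset _
  unfold Spec_fft_past_offset fft_past_offset fft_past_offset_alt
  dsimp only
  have hfd : PySem.Int.floordiv (inp.length : Int) 2 = (inp.length : Int) / 2 :=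
    PySem.Int.floordiv_eq_ediv_of_pos (by norm_num)
  set L : Int := if offset < PySem.Int.floordiv (inp.length : Int) 2
      then PySem.Int.floordiv (inp.length : Int) 2 else offset with hL
  have hL0 : 0 ≤ L := by
    rw [hL]; split_ifs with hc
    · rw [hfd]; omega
    · rw [hfd] at hc; omega
  clear hL
  clear_value L
  have hhead : PySem.List.slice inp none (some L) = inp.take L.toNat :=
    PySem.List.slice_to _ hL0
  have htail : PySem.List.slice inp (some L) none = inp.drop L.toNat :=
    PySem.List.slice_from _ hL0
  rw [hhead, htail, bTail_sum]
  by_cases h : L ≤ (inp.length : Int)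
  · obtain ⟨l, hLl⟩ : ∃ l : Nat, L = (l : Int) := ⟨L.toNat, (Int.toNat_of_nonneg hL0).symm⟩
    subst hLl
    have hln : l ≤ inp.length := by omega
    have hA : PySem.List.pyRange ((inp.length : Int) - 1) ((l : Int) - 1) (-1)
        = (PySem.List.pyRange (l : Int) (inp.length : Int) 1).reverse := by
      rw [PySem.List.pyRange_neg_one_eq_reverse,
        show ((l : Int) - 1 + 1 = (l : Int)) from by ring,
        show ((inp.length : Int) - 1 + 1 = (inp.length : Int)) from by ring]
    rw [hA, List.foldl_reverse, Aloop inp (inp.length - l) l hln rfl]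
    simp
  · -- L beyond the end: A's loop is empty; B's tail is empty and head is all of inp
    rw [PySem.List.pyRange_neg_one_eq_nil (by omega)]
    have : inp.length ≤ L.toNat := by omega
    simp [List.foldl_nil, List.drop_eq_nil_of_le this, List.take_of_length_le this,
      specTail]
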